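-- pv_equiv track=rewrite | github.com/zerodbg/golden-flower-predictor | main.py | convert_to_shape
-- ===== SOURCE A (Python) =====
-- def convert_to_shape(sequence):
--     """Convert letter sequence to shape pattern (e.g., AAB -> XXY)"""
--     mapping = {}
--     next_char = 'X'
--     shape = []
--     for letter in sequence:
--         if letter not in mapping:
--             mapping[letter] = next_char
--             next_char = chr(ord(next_char) + 1)
--         shape.append(mapping[letter])
--     return ''.join(shape)
-- ===== SOURCE B (Python) =====
-- def convert_to_shape(sequence):
--     """Convert letter sequence to shape pattern (e.g., AAB -> XXY)"""
--     return ''.join(chr(88 + len(set(sequence[:sequence.index(letter)])))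
--                    for letter in sequence)
-- ===== Notes on version B (the rewrite author's own statement) =====
-- stated objective: alternative
-- what changed: Drops the mapping dict and counter entirely: each output character is computed independently by a per-position closed form, chr(88 + number of distinct letters strictly before that letter's first occurrence), using index and a prefix set instead of any stateful translation table.
import Mathlib
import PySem

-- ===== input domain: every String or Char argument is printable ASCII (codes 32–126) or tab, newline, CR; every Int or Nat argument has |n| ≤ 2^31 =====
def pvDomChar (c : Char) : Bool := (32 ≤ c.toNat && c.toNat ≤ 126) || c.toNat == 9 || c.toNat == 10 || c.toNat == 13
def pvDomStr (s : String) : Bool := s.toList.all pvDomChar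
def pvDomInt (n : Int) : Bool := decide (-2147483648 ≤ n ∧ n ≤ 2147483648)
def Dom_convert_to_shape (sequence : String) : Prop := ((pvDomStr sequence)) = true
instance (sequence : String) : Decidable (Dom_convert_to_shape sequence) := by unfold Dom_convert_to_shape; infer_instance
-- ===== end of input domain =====

-- B drops A's mapping dict and counter entirely: each output char is a per-position closed
-- form, chr(88 + #distinct letters before that letter's first occurrence). (objective: alternative)

-- ===== PORT A =====
-- the loop body of A's for-loop, as a named step function over the state (mapping, next_char, shape)
def pvStepA (st : PySem.Dict Char Char × Char × List Char) (letter : Char) :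
    PySem.Dict Char Char × Char × List Char :=
  let p := if st.1.contains letter then (st.1, st.2.1)
           else (st.1.insert letter st.2.1, Char.ofNat (st.2.1.toNat + 1))
  (p.1, p.2, st.2.2 ++ [p.1.getD letter ' '])

def convert_to_shape (sequence : String) : String :=
  let st := sequence.toList.foldl pvStepA (PySem.Dict.empty, 'X', [])
  String.mk st.2.2

-- ===== PORT B =====
-- sequence.index(letter) on a string is the first index of that character; since letter is
-- drawn from sequence it always succeeds, ported as (index? … letter).getD 0 (exact here).
def convert_to_shape_alt (sequence : String) : String :=
  String.mk (sequence.toList.map (fun letter =>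
    Char.ofNat (88 + (PySem.Set.ofList
      (PySem.List.slice sequence.toList none
        (some (((PySem.List.index? sequence.toList letter).getD 0 : Nat) : Int)))).length)))

-- ===== PRECONDITION & SPEC =====
def Spec_convert_to_shape (sequence : String) (out : String) : Prop := out = convert_to_shape_alt sequence
instance (sequence : String) (out : String) : Decidable (Spec_convert_to_shape sequence out) := by unfold Spec_convert_to_shape; infer_instance

-- ===== CLAIM =====
def Claim_equal_convert_to_shape : Prop := ∀ (sequence : String), Dom_convert_to_shape sequence → Spec_convert_to_shape sequence (convert_to_shape sequence)

-- ===== LEMMAS AND PROOFS =====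

-- the mapping dict A has built after seeing exactly the distinct letters u (in order)
def pvDictOf (u : List Char) : PySem.Dict Char Char :=
  PySem.Dict.mk (u.zipIdx.map (fun q => (q.1, Char.ofNat (88 + q.2))))

theorem pvKeys_dictOf (u : List Char) : (pvDictOf u).keys = u := by
  simp [pvDictOf, PySem.Dict.keys, List.map_map, Function.comp_def]

theorem pvNodupSnoc {u : List Char} {c : Char} (hn : u.Nodup) (hc : c ∉ u) :
    (u ++ [c]).Nodup := by
  simp [List.nodup_append, hn]
  exact fun a ha h => hc (h ▸ ha)

theorem pvSet_add_of_not_mem {u : List Char} {c : Char} (h : c ∉ u) :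
    PySem.Set.add u c = u ++ [c] := by
  simp [PySem.Set.add, PySem.Set.contains]
  intro hc; exact absurd hc h

theorem pvSet_add_of_mem {u : List Char} {c : Char} (h : c ∈ u) :
    PySem.Set.add u c = u := by
  simp [PySem.Set.add, PySem.Set.contains, h]

theorem pvUpdate_cons (u : List Char) (c : Char) (l : List Char) :
    PySem.Set.update u (c :: l) = PySem.Set.update (PySem.Set.add u c) l := rfl

theorem pvUpdate_eq_foldl (l : List Char) : ∀ (u : List Char),
    PySem.Set.update u l = l.foldl PySem.Set.add u := by
  induction l with
  | nil => intro u; simp [PySem.Set.update]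
  | cons c rest ih => intro u; rw [pvUpdate_cons, List.foldl_cons, ih]

theorem pvUpdate_extends (l : List Char) : ∀ (u : List Char), ∃ t, PySem.Set.update u l = u ++ t := by
  induction l with
  | nil => intro u; exact ⟨[], by simp [PySem.Set.update]⟩
  | cons c rest ih =>
    intro u
    rw [pvUpdate_cons]
    obtain ⟨t, ht⟩ := ih (PySem.Set.add u c)
    by_cases hc : c ∈ u
    · exact ⟨t, by rw [ht, pvSet_add_of_mem hc]⟩
    · exact ⟨c :: t, by rw [ht, pvSet_add_of_not_mem hc]; simp⟩

theorem pvIdxOf_update {u : List Char} {c : Char} (hc : c ∈ u) (l : List Char) :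
    List.idxOf c (PySem.Set.update u l) = List.idxOf c u := by
  obtain ⟨t, ht⟩ := pvUpdate_extends l u
  rw [ht, List.idxOf_append, if_pos hc]

-- distinct dom-chars: at most 128 of them, so 88 + u.length is a valid Char code
def pvAllChars : List Char := (List.range 128).map Char.ofNat

theorem pvLen_le {u : List Char} (hn : u.Nodup) (hd : ∀ c ∈ u, pvDomChar c = true) :
    u.length ≤ 128 := by
  have hsub : u ⊆ pvAllChars := by
    intro c hc
    have := hd c hc
    simp [pvDomChar] at this
    have hlt : c.toNat < 128 := by omega
    have : Char.ofNat c.toNat ∈ pvAllChars := by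
      simp only [pvAllChars, List.mem_map, List.mem_range]
      exact ⟨c.toNat, hlt, rfl⟩
    simpa [Char.ofNat_toNat] using this
  have := (hn.subperm hsub).length_le
  simpa [pvAllChars] using this

theorem pvToNat_ofNat {n : Nat} (h : n < 55296) : (Char.ofNat n).toNat = n := by
  rw [Char.toNat_ofNat, if_pos (Or.inl h)]

theorem pvGetD_dictOf {u : List Char} {c : Char} (hn : u.Nodup) (hc : c ∈ u) :
    (pvDictOf u).getD c ' ' = Char.ofNat (88 + List.idxOf c u) := by
  apply PySem.Dict.getD_of_mem_items
  · have hk : List.idxOf c u < u.length := List.idxOf_lt_length_of_mem hc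
    have hz : (u[List.idxOf c u], List.idxOf c u) ∈ u.zipIdx :=
      List.mem_zipIdx_iff_getElem?.mpr (by rw [List.getElem?_eq_getElem hk])
    have hget : u[List.idxOf c u] = c := List.getElem_idxOf hk
    rw [hget] at hz
    show _ ∈ (u.zipIdx.map (fun q => (q.1, Char.ofNat (88 + q.2))))
    exact List.mem_map.mpr ⟨(c, List.idxOf c u), hz, rfl⟩
  · rw [pvKeys_dictOf]; exact hn

theorem pvContains_dictOf (u : List Char) (c : Char) :
    (pvDictOf u).contains c = decide (c ∈ u) := by
  rw [PySem.Dict.contains_eq_decide_mem_keys, pvKeys_dictOf]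

theorem pvInsert_dictOf {u : List Char} {c : Char} (hc : c ∉ u) :
    (pvDictOf u).insert c (Char.ofNat (88 + u.length)) = pvDictOf (u ++ [c]) := by
  apply PySem.Dict.ext
  rw [PySem.Dict.items_insert_of_not_contains _ _ (by simp [pvContains_dictOf, hc])]
  simp [pvDictOf, List.zipIdx_append]

-- main loop invariant for A's fold
theorem pvLoopA_inv (l : List Char) : ∀ (u : List Char) (shape : List Char),
    u.Nodup → (∀ c ∈ u, pvDomChar c = true) → (∀ c ∈ l, pvDomChar c = true) →
    l.foldl pvStepA (pvDictOf u, Char.ofNat (88 + u.length), shape)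
      = (pvDictOf (PySem.Set.update u l), Char.ofNat (88 + (PySem.Set.update u l).length),
         shape ++ l.map (fun c => Char.ofNat (88 + List.idxOf c (PySem.Set.update u l)))) := by
  induction l with
  | nil => intro u shape _ _ _; simp [PySem.Set.update]
  | cons c rest ih =>
    intro u shape hn hd hl
    have hcdom : pvDomChar c = true := hl c (by simp)
    have hrest : ∀ x ∈ rest, pvDomChar x = true := fun x hx => hl x (by simp [hx])
    rw [List.foldl_cons, pvUpdate_cons]
    by_cases hc : c ∈ u
    · have hstep : pvStepA (pvDictOf u, Char.ofNat (88 + u.length), shape) c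
          = (pvDictOf u, Char.ofNat (88 + u.length),
             shape ++ [Char.ofNat (88 + List.idxOf c u)]) := by
        simp [pvStepA, pvContains_dictOf, hc, pvGetD_dictOf hn hc]
      rw [hstep, pvSet_add_of_mem hc, ih u _ hn hd hrest]
      have : List.idxOf c (PySem.Set.update u rest) = List.idxOf c u := pvIdxOf_update hc rest
      simp [this]
    · have hnod : (u ++ [c]).Nodup := pvNodupSnoc hn hc
      have hdom' : ∀ x ∈ u ++ [c], pvDomChar x = true := by
        intro x hx; rcases List.mem_append.mp hx with h | h
        · exact hd x h
        · simp at h; subst h; exact hcdom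
      have hlen : u.length + 1 ≤ 128 := (pvLen_le hnod hdom').trans_eq' (by simp)
      have hvalid : (Char.ofNat (88 + u.length)).toNat = 88 + u.length :=
        pvToNat_ofNat (by omega)
      have hgd : (pvDictOf (u ++ [c])).getD c ' ' = Char.ofNat (88 + List.idxOf c (u ++ [c])) :=
        pvGetD_dictOf hnod (by simp)
      have hstep : pvStepA (pvDictOf u, Char.ofNat (88 + u.length), shape) c
          = (pvDictOf (u ++ [c]), Char.ofNat (88 + (u ++ [c]).length),
             shape ++ [Char.ofNat (88 + List.idxOf c (u ++ [c]))]) := by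
        simp only [pvStepA, pvContains_dictOf]
        rw [if_neg (by simp [hc])]
        simp only [pvInsert_dictOf hc, hvalid, hgd]
        rw [show (u ++ [c]).length = u.length + 1 from by simp, Nat.add_assoc]
      rw [hstep, pvSet_add_of_not_mem hc, ih (u ++ [c]) _ hnod hdom' hrest]
      have hmem : c ∈ u ++ [c] := by simp
      simp [pvIdxOf_update hmem rest]

-- A's result, closed form
theorem pvA_closed (s : String) (hdom : Dom_convert_to_shape s) :
    convert_to_shape s
      = String.mk ((s.toList).map
          (fun c => Char.ofNat (88 + List.idxOf c (PySem.List.dedup s.toList)))) := by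
  have hl : ∀ c ∈ s.toList, pvDomChar c = true := by
    intro c hc
    have := hdom
    simp [Dom_convert_to_shape, pvDomStr, List.all_eq_true] at this
    exact this c hc
  have hinv := pvLoopA_inv s.toList [] [] (by simp) (by simp) hl
  have hupd : PySem.Set.update ([] : List Char) s.toList = PySem.List.dedup s.toList := by
    rw [PySem.List.dedup_eq_ofList, PySem.Set.ofList_eq_foldl]; rfl
  show String.mk (s.toList.foldl pvStepA (PySem.Dict.empty, 'X', [])).2.2 = _
  rw [show (PySem.Dict.empty : PySem.Dict Char Char) = pvDictOf [] from rfl,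
      show 'X' = Char.ofNat (88 + ([] : List Char).length) from by decide]
  rw [hinv, hupd]
  simp

-- B's per-letter closed form: #distinct letters in the prefix before c's first occurrence
-- equals c's rank in the first-appearance dedup
theorem pvB_rank (l : List Char) (c : Char) (hc : c ∈ l) :
    (PySem.Set.ofList (PySem.List.slice l none
        (some (((PySem.List.index? l c).getD 0 : Nat) : Int)))).length
      = List.idxOf c (PySem.List.dedup l) := by
  have hsome : (PySem.List.index? l c).isSome := (PySem.List.index?_isSome_iff l c).mpr hc
  obtain ⟨k, hk⟩ := Option.isSome_iff_exists.mp hsome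
  obtain ⟨pre, suf, hsplit, hlen, hnp⟩ := (PySem.List.index?_eq_some_iff l c k).mp hk
  have hcnp : c ∉ PySem.Set.ofList pre := fun h =>
    hnp ((PySem.Set.mem_ofList pre c).mp h)
  have htake : l.take k = pre := by
    rw [hsplit, ← hlen, List.take_left]
  have hded : List.idxOf c (PySem.List.dedup l) = (PySem.Set.ofList pre).length := by
    rw [PySem.List.dedup_eq_ofList, hsplit, PySem.Set.ofList_eq_foldl, List.foldl_append,
        List.foldl_cons, ← PySem.Set.ofList_eq_foldl,
        pvSet_add_of_not_mem hcnp, ← pvUpdate_eq_foldl,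
        pvIdxOf_update (by simp : c ∈ PySem.Set.ofList pre ++ [c]) suf,
        List.idxOf_append, if_neg hcnp, List.idxOf_cons_self]
    omega
  rw [hk, Option.getD_some, PySem.List.slice_to_natCast, htake, hded]

-- ===== VERDICT =====
theorem convert_to_shape_spec : Claim_equal_convert_to_shape := by
  intro s hdom
  show convert_to_shape s = convert_to_shape_alt s
  rw [pvA_closed s hdom]
  show _ = String.mk (s.toList.map _)
  congr 1
  apply List.map_congr_left
  intro c hcmem
  rw [pvB_rank s.toList c hcmem]
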